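-- pv_equiv track=rewrite | github.com/google-research/google-research | CardBench_zero_shot_cardinality_training/generate_training_querygraphs_library/estimate_selectivity.py | get_pos_int
-- ===== SOURCE A (Python) =====
-- def get_pos_int(
--     percentiles, value
-- ):
--   """Gets the position of the value in the percentiles.
--
--   Args:
--     percentiles: The percentiles.
--     value: The value.
--
--   Returns:
--     A tuple of the position of the value in the percentiles.
--   """
--   no_precentiles = len(percentiles)
--   last_percentile = 0
--
--   for i in range(1, len(percentiles)):
--     last_percentile = i
--     if value <= int(percentiles[i]):
--       break
--
--   first_percentile = last_percentile - 1
--   while first_percentile > 1 and int(percentiles[first_percentile]) == value: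
--     first_percentile -= 1
--
--   minv = int(percentiles[first_percentile])
--   maxv = int(percentiles[last_percentile])
--   low = int(percentiles[0])
--   high = int(percentiles[-1])
--
--   return (
--       low,
--       high,
--       minv,
--       maxv,
--       first_percentile,
--       last_percentile,
--       no_precentiles,
--   )
-- ===== SOURCE B (Python) =====
-- def get_pos_int(percentiles, value):
--     """Single reverse scan keeping the leftmost qualifying index; the original's
--     walk-down while loop is dead code (every element scanned before the break
--     point is < value), so first_percentile is always last_percentile - 1."""
--     vals = [int(p) for p in percentiles]
--     n = len(vals)
--     last_percentile = n - 1 if n > 1 else 0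
--     for i in range(n - 2, 0, -1):
--         if value <= vals[i]:
--             last_percentile = i
--     first_percentile = last_percentile - 1
--     return (
--         vals[0],
--         vals[-1],
--         vals[first_percentile],
--         vals[last_percentile],
--         first_percentile,
--         last_percentile,
--         n,
--     )
-- ===== Notes on version B (the rewrite author's own statement) =====
-- stated objective: simpler
-- what changed: One reverse scan that keeps the leftmost index with value <= element replaces A's forward break-loop, and A's walk-down while loop is removed as dead code (every element scanned before the break point is < value, so its condition can never fire): first_percentile is always last_percentile - 1.
import Mathlib
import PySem

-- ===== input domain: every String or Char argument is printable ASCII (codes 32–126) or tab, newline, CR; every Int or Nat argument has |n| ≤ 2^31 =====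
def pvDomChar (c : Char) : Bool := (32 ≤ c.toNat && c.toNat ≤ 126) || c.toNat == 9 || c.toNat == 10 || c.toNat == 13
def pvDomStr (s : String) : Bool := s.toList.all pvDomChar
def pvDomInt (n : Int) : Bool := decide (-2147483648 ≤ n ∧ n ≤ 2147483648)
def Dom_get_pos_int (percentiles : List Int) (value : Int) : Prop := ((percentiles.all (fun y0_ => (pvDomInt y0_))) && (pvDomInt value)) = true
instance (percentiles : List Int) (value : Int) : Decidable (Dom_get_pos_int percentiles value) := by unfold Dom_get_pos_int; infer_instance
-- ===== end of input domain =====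

-- B is simpler: one reverse scan keeping the leftmost qualifying index replaces A's forward
-- break-loop, and A's walk-down while loop (dead code: every element scanned before the
-- break point is < value) is dropped, so first_percentile is just last_percentile - 1.

-- ===== PORT A =====
-- for i in range(1, len(percentiles)): last_percentile = i; if value <= int(percentiles[i]): break
-- (int(...) is the identity on Int arguments; indexing via pyGetD is exact for in-range indices)
def get_pos_int_forLoop (percentiles : List Int) (value : Int) : List Int → Int → Int
  | [], last => last
  | i :: rest, _ =>
    if value ≤ PySem.List.pyGetD percentiles i 0 then i
    else get_pos_int_forLoop percentiles value rest i

-- while first_percentile > 1 and int(percentiles[first_percentile]) == value: first_percentile -= 1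
-- (structural fuel recursion; fuel = first.toNat bounds the iterations exactly, so the loop is exact)
def get_pos_int_whileLoop (percentiles : List Int) (value : Int) : Nat → Int → Int
  | 0, first => first
  | fuel + 1, first =>
    if first > 1 ∧ PySem.List.pyGetD percentiles first 0 = value then
      get_pos_int_whileLoop percentiles value fuel (first - 1)
    else first

def get_pos_int (percentiles : List Int) (value : Int) : List Int :=
  let no_precentiles : Int := percentiles.length
  let last_percentile :=
    get_pos_int_forLoop percentiles value
      (PySem.List.pyRange 1 percentiles.length 1) 0
  let first_percentile :=
    get_pos_int_whileLoop percentiles value (last_percentile - 1).toNat (last_percentile - 1)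
  let minv := PySem.List.pyGetD percentiles first_percentile 0
  let maxv := PySem.List.pyGetD percentiles last_percentile 0
  let low := PySem.List.pyGetD percentiles 0 0
  let high := PySem.List.pyGetD percentiles (-1) 0
  [low, high, minv, maxv, first_percentile, last_percentile, no_precentiles]

-- ===== PORT B =====
-- last_percentile = n - 1 if n > 1 else 0; for i in range(n - 2, 0, -1): if value <= vals[i]: last_percentile = i
def get_pos_int_alt (percentiles : List Int) (value : Int) : List Int :=
  let n : Int := percentiles.length
  let last0 : Int := if 1 < n then n - 1 else 0
  let last_percentile :=
    (PySem.List.pyRange (n - 2) 0 (-1)).foldl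
      (fun last i => if value ≤ PySem.List.pyGetD percentiles i 0 then i else last) last0
  let first_percentile := last_percentile - 1
  [PySem.List.pyGetD percentiles 0 0,
   PySem.List.pyGetD percentiles (-1) 0,
   PySem.List.pyGetD percentiles first_percentile 0,
   PySem.List.pyGetD percentiles last_percentile 0,
   first_percentile, last_percentile, n]

-- ===== PRECONDITION & SPEC =====
-- Pre_ excludes only the empty list, on which A raises IndexError (percentiles[0]).
def Pre_get_pos_int (percentiles : List Int) (_value : Int) : Prop :=
  percentiles ≠ []
instance (percentiles : List Int) (value : Int) : Decidable (Pre_get_pos_int percentiles value) := by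
  unfold Pre_get_pos_int; infer_instance

def pvWitness_get_pos_int : List Int × Int := ([0, 3, 3, 7], 3)

def Spec_get_pos_int (percentiles : List Int) (value : Int) (out : List Int) : Prop := out = get_pos_int_alt percentiles value
instance (percentiles : List Int) (value : Int) (out : List Int) : Decidable (Spec_get_pos_int percentiles value out) := by unfold Spec_get_pos_int; infer_instance

-- ===== CLAIM (what is proved, stated in full; the proofs are below) =====
def Claim_equal_get_pos_int : Prop := ∀ (percentiles : List Int) (value : Int), Dom_get_pos_int percentiles value → Pre_get_pos_int percentiles value → Spec_get_pos_int percentiles value (get_pos_int percentiles value)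

-- ===== LEMMAS AND PROOFS =====

lemma forLoop_unfold {ps : List Int} {v : Int} (a init : Int) (h : a < (ps.length : Int)) :
    get_pos_int_forLoop ps v (PySem.List.pyRange a (ps.length : Int) 1) init
      = if v ≤ PySem.List.pyGetD ps a 0 then a
        else get_pos_int_forLoop ps v (PySem.List.pyRange (a + 1) (ps.length : Int) 1) a := by
  rw [PySem.List.pyRange_one_cons h]
  rfl

-- the scan invariant of A's for loop: every index strictly between the start and the
-- returned break index holds an element < value (this is why A's while loop is dead code)
lemma forLoop_scan {ps : List Int} {v : Int} :
    ∀ (d : Nat) (a init : Int), 1 ≤ a → a < (ps.length : Int) → ((ps.length : Int) - a).toNat = d →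
    a ≤ get_pos_int_forLoop ps v (PySem.List.pyRange a (ps.length : Int) 1) init
    ∧ get_pos_int_forLoop ps v (PySem.List.pyRange a (ps.length : Int) 1) init ≤ (ps.length : Int) - 1
    ∧ (∀ k : Int, a ≤ k →
        k < get_pos_int_forLoop ps v (PySem.List.pyRange a (ps.length : Int) 1) init →
        PySem.List.pyGetD ps k 0 < v) := by
  intro d
  induction d with
  | zero => intro a init h1 h2 hd; omega
  | succ d ih =>
    intro a init h1 h2 hd
    rw [forLoop_unfold a init h2]
    by_cases hva : v ≤ PySem.List.pyGetD ps a 0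
    · rw [if_pos hva]
      exact ⟨le_refl a, by omega, fun k hk1 hk2 => absurd (lt_of_le_of_lt hk1 hk2) (by omega)⟩
    · rw [if_neg hva]
      by_cases hend : a + 1 < (ps.length : Int)
      · obtain ⟨c1, c2, c3⟩ := ih (a + 1) a (by omega) hend (by omega)
        refine ⟨by omega, c2, fun k hk1 hk2 => ?_⟩
        rcases eq_or_lt_of_le hk1 with heq | hlt
        · exact heq ▸ not_le.mp hva
        · exact c3 k (by omega) hk2
      · rw [PySem.List.pyRange_one_eq_nil (by omega)]
        simp only [get_pos_int_forLoop]
        exact ⟨le_refl a, by omega, fun k hk1 hk2 => absurd (lt_of_le_of_lt hk1 hk2) (by omega)⟩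

-- B's reverse fold, started at index b-1 from A's scan result for the suffix [b, n), equals
-- A's scan result for the whole range [1, n)
lemma revFold_eq {ps : List Int} {v : Int} :
    ∀ (b : Nat), 1 ≤ b → (b : Int) ≤ (ps.length : Int) - 1 →
    (PySem.List.pyRange ((b : Int) - 1) 0 (-1)).foldl
        (fun last i => if v ≤ PySem.List.pyGetD ps i 0 then i else last)
        (get_pos_int_forLoop ps v (PySem.List.pyRange (b : Int) (ps.length : Int) 1) 0)
      = get_pos_int_forLoop ps v (PySem.List.pyRange 1 (ps.length : Int) 1) 0 := by
  intro b
  induction b with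
  | zero => intro h1 h2; omega
  | succ b ih =>
    intro h1 h2
    by_cases hb : b = 0
    · subst hb
      rw [show (((1 : Nat) : Int) - 1) = 0 by norm_num,
          PySem.List.pyRange_neg_one_eq_nil (le_refl 0)]
      norm_num
    · have hcast : (((b + 1 : Nat) : Int) - 1) = (b : Int) := by push_cast; ring
      rw [hcast, PySem.List.pyRange_neg_one_cons (by exact_mod_cast Nat.pos_of_ne_zero hb),
          List.foldl_cons]
      have hbn : (b : Int) < (ps.length : Int) := by omega
      have hb1n : (b : Int) + 1 < (ps.length : Int) := by push_cast at h2 ⊢; omega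
      have hstep :
          (if v ≤ PySem.List.pyGetD ps (b : Int) 0 then (b : Int)
           else get_pos_int_forLoop ps v
             (PySem.List.pyRange (((b + 1 : Nat) : Int)) (ps.length : Int) 1) 0)
          = get_pos_int_forLoop ps v (PySem.List.pyRange (b : Int) (ps.length : Int) 1) 0 := by
        rw [forLoop_unfold (b : Int) 0 hbn]
        by_cases hv : v ≤ PySem.List.pyGetD ps (b : Int) 0
        · rw [if_pos hv, if_pos hv]
        · rw [if_neg hv, if_neg hv]
          rw [show (((b + 1 : Nat) : Int)) = (b : Int) + 1 by push_cast; ring]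
          rw [forLoop_unfold ((b : Int) + 1) 0 hb1n, forLoop_unfold ((b : Int) + 1) (b : Int) hb1n]
      rw [hstep]
      exact ih (by omega) (by omega)

-- ===== VERDICT (by name: the statement is the Claim_ definition above) =====
theorem get_pos_int_spec : Claim_equal_get_pos_int := by
  intro ps v hdom hpre
  have hne : ps ≠ [] := hpre
  have hn : 1 ≤ ps.length := List.length_pos_of_ne_nil hne
  show get_pos_int ps v = get_pos_int_alt ps v
  simp only [get_pos_int, get_pos_int_alt]
  by_cases h2 : 2 ≤ (ps.length : Int)
  · -- n ≥ 2
    obtain ⟨c1, c2, c3⟩ :=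
      forLoop_scan (ps := ps) (v := v) ((ps.length : Int) - 1).toNat 1 0 le_rfl (by omega) rfl
    set T : Int := get_pos_int_forLoop ps v (PySem.List.pyRange 1 (ps.length : Int) 1) 0 with hT
    -- A's while loop is dead code: it returns its argument T - 1 unchanged
    have hdead : get_pos_int_whileLoop ps v (T - 1).toNat (T - 1) = T - 1 := by
      have hcond : ¬ ((T - 1) > 1 ∧ PySem.List.pyGetD ps (T - 1) 0 = v) := by
        rintro ⟨hgt, heq⟩
        exact absurd heq (ne_of_lt (c3 (T - 1) (by omega) (by omega)))
      cases hft : (T - 1).toNat with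
      | zero => simp only [get_pos_int_whileLoop]
      | succ k =>
        simp only [get_pos_int_whileLoop]
        rw [if_neg hcond]
    -- B's reverse fold computes the same break index T
    have hlast0 : (if 1 < (ps.length : Int) then (ps.length : Int) - 1 else 0)
        = (ps.length : Int) - 1 := if_pos (by omega)
    have hRtop : get_pos_int_forLoop ps v
        (PySem.List.pyRange ((ps.length : Int) - 1) (ps.length : Int) 1) 0
        = (ps.length : Int) - 1 := by
      rw [forLoop_unfold ((ps.length : Int) - 1) 0 (by omega),
          PySem.List.pyRange_one_eq_nil (by omega)]
      simp only [get_pos_int_forLoop]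
      split_ifs <;> rfl
    have hfold : (PySem.List.pyRange ((ps.length : Int) - 2) 0 (-1)).foldl
        (fun last i => if v ≤ PySem.List.pyGetD ps i 0 then i else last)
        ((ps.length : Int) - 1) = T := by
      have hb := revFold_eq (ps := ps) (v := v) (ps.length - 1) (by omega) (by omega)
      rw [show (((ps.length - 1 : Nat) : Int)) = (ps.length : Int) - 1 by omega] at hb
      rw [show ((ps.length : Int) - 1 - 1) = (ps.length : Int) - 2 by ring] at hb
      rw [hRtop] at hb
      exact hb
    rw [hlast0, hfold, hdead]
  · -- n = 1
    have hlen : ps.length = 1 := by omega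
    rw [hlen]
    norm_num [PySem.List.pyRange_one_eq_nil, PySem.List.pyRange_neg_one_eq_nil]
    simp only [get_pos_int_forLoop]
    norm_num
    exact ⟨rfl, rfl⟩
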